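-- pv_equiv track=rewrite | github.com/TalDugma/Data-Extraction-Mindray-Monitor | NumberRecognition/number_recognition.py | get_nibp
-- ===== SOURCE A (Python) =====
-- def get_nibp(nibp):
--     nibp_1, nibp_2,= [],[]
--     if len(nibp)>8:
--         return -1,-1,-1
--     else:
--         y_low = nibp[0][1][1]
--         for ((number,tag),location) in nibp:
--             if location[1] - y_low < 20:
--                 nibp_1.append(tag)
--             else:
--                 nibp_2.append(tag)
--     if len(nibp_1)==4 and len(nibp_2)==3:
--         return 10*nibp_1[0]+nibp_1[1],10*nibp_1[2]+nibp_1[3],10*nibp_2[0]+nibp_2[1]+nibp_2[2]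
--     if len(nibp_1)==4 and len(nibp_2)==2:
--         return 10*nibp_1[0]+nibp_1[1],10*nibp_1[2]+nibp_1[3],10*nibp_2[0]+nibp_2[1]
--     if len(nibp_1)==5 and len(nibp_2)==2:
--         return 100*nibp_1[0]+10*nibp_1[1]+nibp_1[2],10*nibp_1[3]+nibp_1[4],10*nibp_2[0]+nibp_2[1]
--     if len(nibp_1)==5 and len(nibp_2)==3:
--         return 100*nibp_1[0]+10*nibp_1[1]+nibp_1[2],10*nibp_1[3]+nibp_1[4],10*nibp_2[0]+nibp_2[1]+nibp_2[2]
--     return -1,-1,-1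
-- ===== SOURCE B (Python) =====
-- def get_nibp(nibp):
--     if len(nibp) > 8:
--         return -1, -1, -1
--     y_low = nibp[0][1][1]
--     n1 = sum(loc[1] - y_low < 20 for (_, loc) in nibp)
--     n2 = len(nibp) - n1
--     if n1 not in (4, 5) or n2 not in (2, 3):
--         return -1, -1, -1
--     sys = dia = third = 0
--     i = j = 0
--     for ((_, tag), loc) in nibp:
--         if loc[1] - y_low < 20:
--             if i < n1 - 2:
--                 sys = 10 * sys + tag
--             else:
--                 dia = 10 * dia + tag
--             i += 1
--         else:
--             third += 10 * tag if j == 0 else tag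
--             j += 1
--     return sys, dia, third
-- ===== Notes on version B (the rewrite author's own statement) =====
-- stated objective: alternative
-- what changed: B builds no digit lists at all: it counts the near-row detections with an indicator sum, validates the two counts once, and then accumulates the three numbers purely arithmetically in a single pass with running group indices, instead of A's append-loop list partition followed by four length-guarded branches of hard-coded index arithmetic.
-- outside the precondition, e.g. on get_nibp([]): A raises IndexError, B raises IndexError
import Mathlib
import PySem

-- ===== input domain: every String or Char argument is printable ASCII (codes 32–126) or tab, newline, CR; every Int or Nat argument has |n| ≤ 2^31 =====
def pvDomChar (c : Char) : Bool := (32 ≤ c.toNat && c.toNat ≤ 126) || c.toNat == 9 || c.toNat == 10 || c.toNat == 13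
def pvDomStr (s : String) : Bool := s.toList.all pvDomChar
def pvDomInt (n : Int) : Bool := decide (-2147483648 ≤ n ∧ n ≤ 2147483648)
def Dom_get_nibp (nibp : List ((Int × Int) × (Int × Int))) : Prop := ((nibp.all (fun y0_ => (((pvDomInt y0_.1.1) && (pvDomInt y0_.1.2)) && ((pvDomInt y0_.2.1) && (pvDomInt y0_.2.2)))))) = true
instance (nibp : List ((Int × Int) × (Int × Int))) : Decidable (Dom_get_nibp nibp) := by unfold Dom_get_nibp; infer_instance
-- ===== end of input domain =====

-- B builds no intermediate digit lists: a counting pass plus one arithmetic accumulation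
-- pass with running indices replaces A's list partition and four length-guarded branches
-- (objective: alternative); the two programs agree on every non-empty input.

-- ===== PORT A =====
-- literal transliteration of A: append-loop partition, then four length-guarded returns
def get_nibp (nibp : List ((Int × Int) × (Int × Int))) : Int × Int × Int :=
  if nibp.length > 8 then (-1, -1, -1)
  else
    match nibp with
    | [] => (-1, -1, -1)  -- Python raises IndexError at nibp[0][1][1]; excluded by Pre_
    | ((_, _), (_, y_low)) :: _ =>
      let p := nibp.foldl (fun (acc : List Int × List Int) x =>
        if x.2.2 - y_low < 20 then (acc.1 ++ [x.1.2], acc.2)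
        else (acc.1, acc.2 ++ [x.1.2])) ([], [])
      let n1 := p.1
      let n2 := p.2
      if n1.length = 4 ∧ n2.length = 3 then
        (10*n1[0]! + n1[1]!, 10*n1[2]! + n1[3]!, 10*n2[0]! + n2[1]! + n2[2]!)
      else if n1.length = 4 ∧ n2.length = 2 then
        (10*n1[0]! + n1[1]!, 10*n1[2]! + n1[3]!, 10*n2[0]! + n2[1]!)
      else if n1.length = 5 ∧ n2.length = 2 then
        (100*n1[0]! + 10*n1[1]! + n1[2]!, 10*n1[3]! + n1[4]!, 10*n2[0]! + n2[1]!)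
      else if n1.length = 5 ∧ n2.length = 3 then
        (100*n1[0]! + 10*n1[1]! + n1[2]!, 10*n1[3]! + n1[4]!, 10*n2[0]! + n2[1]! + n2[2]!)
      else (-1, -1, -1)

-- ===== PORT B =====
-- literal transliteration of B: count the near-row detections, validate the two counts,
-- then one pass accumulating the three numbers arithmetically with running indices i, j
def get_nibp_alt (nibp : List ((Int × Int) × (Int × Int))) : Int × Int × Int :=
  if nibp.length > 8 then (-1, -1, -1)
  else
    match nibp with
    | [] => (-1, -1, -1)  -- Python raises IndexError at nibp[0][1][1]; excluded by Pre_
    | ((_, _), (_, y_low)) :: _ =>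
      let n1 : Int := (nibp.map (fun x => if x.2.2 - y_low < 20 then (1 : Int) else 0)).sum
      let n2 : Int := (nibp.length : Int) - n1
      if ¬((n1 = 4 ∨ n1 = 5) ∧ (n2 = 2 ∨ n2 = 3)) then (-1, -1, -1)
      else
        let st := nibp.foldl (fun (st : Int × Int × Int × Int × Int) x =>
          match st with
          | (sys, dia, third, i, j) =>
            if x.2.2 - y_low < 20 then
              if i < n1 - 2 then (10*sys + x.1.2, dia, third, i + 1, j)
              else (sys, 10*dia + x.1.2, third, i + 1, j)
            else
              (sys, dia, third + (if j = 0 then 10*x.1.2 else x.1.2), i, j + 1))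
          (0, 0, 0, 0, 0)
        (st.1, st.2.1, st.2.2.1)

-- ===== PRECONDITION & SPEC =====
-- Pre_ excludes only the empty list, on which the Python A (and B) raises IndexError at nibp[0][1][1].
def Pre_get_nibp (nibp : List ((Int × Int) × (Int × Int))) : Prop := nibp ≠ []
instance (nibp : List ((Int × Int) × (Int × Int))) : Decidable (Pre_get_nibp nibp) := by unfold Pre_get_nibp; infer_instance
def pvWitness_get_nibp : (List ((Int × Int) × (Int × Int))) := [((1, 2), (3, 4))]
def Spec_get_nibp (nibp : List ((Int × Int) × (Int × Int))) (out : Int × Int × Int) : Prop := out = get_nibp_alt nibp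
instance (nibp : List ((Int × Int) × (Int × Int))) (out : Int × Int × Int) : Decidable (Spec_get_nibp nibp out) := by unfold Spec_get_nibp; infer_instance

-- ===== CLAIM (what is proved, stated in full; the proofs are below) =====
def Claim_equal_get_nibp : Prop := ∀ (nibp : List ((Int × Int) × (Int × Int))), Dom_get_nibp nibp → Pre_get_nibp nibp → Spec_get_nibp nibp (get_nibp nibp)

-- ===== LEMMAS AND PROOFS =====

-- A's append-loop partition equals a filter/map split (generalized accumulator).
theorem pv_partition (y_low : Int) (l : List ((Int × Int) × (Int × Int)))
    (acc : List Int × List Int) :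
    l.foldl (fun (acc : List Int × List Int) x =>
        if x.2.2 - y_low < 20 then (acc.1 ++ [x.1.2], acc.2)
        else (acc.1, acc.2 ++ [x.1.2])) acc =
      (acc.1 ++ (l.filter (fun x => decide (x.2.2 - y_low < 20))).map (fun x => x.1.2),
       acc.2 ++ (l.filter (fun x => decide (x.2.2 - y_low ≥ 20))).map (fun x => x.1.2)) := by
  induction l generalizing acc with
  | nil => simp
  | cons h t ih =>
    by_cases hc : h.2.2 - y_low < 20 <;>
      simp [List.foldl_cons, ih, hc, not_lt.mp]

-- B's indicator sum counts the near-row group.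
theorem pv_count (y_low : Int) (l : List ((Int × Int) × (Int × Int))) :
    (l.map (fun x => if x.2.2 - y_low < 20 then (1 : Int) else 0)).sum =
      ((l.filter (fun x => decide (x.2.2 - y_low < 20))).length : Int) := by
  induction l with
  | nil => simp
  | cons h t ih => by_cases hc : h.2.2 - y_low < 20 <;> simp [hc, ih, Int.add_comm]

-- the two filtered groups together exhaust the list
theorem pv_len (y_low : Int) (l : List ((Int × Int) × (Int × Int))) :
    (l.filter (fun x => decide (x.2.2 - y_low < 20))).length +
      (l.filter (fun x => decide (x.2.2 - y_low ≥ 20))).length = l.length := by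
  induction l with
  | nil => simp
  | cons h t ih => by_cases hc : h.2.2 - y_low < 20 <;> simp [hc, not_lt.mp, ← ih] <;> omega

-- B's combined fold decomposes into independent folds over the two filtered groups.
theorem pv_foldB (y_low n1 : Int) (l : List ((Int × Int) × (Int × Int)))
    (s d t i j : Int) :
    l.foldl (fun (st : Int × Int × Int × Int × Int) x =>
        match st with
        | (sys, dia, third, i, j) =>
          if x.2.2 - y_low < 20 then
            if i < n1 - 2 then (10*sys + x.1.2, dia, third, i + 1, j)
            else (sys, 10*dia + x.1.2, third, i + 1, j)
          else
            (sys, dia, third + (if j = 0 then 10*x.1.2 else x.1.2), i, j + 1)) (s, d, t, i, j) =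
      (let g1 := (l.filter (fun x => decide (x.2.2 - y_low < 20))).map (fun x => x.1.2)
       let g2 := (l.filter (fun x => decide (x.2.2 - y_low ≥ 20))).map (fun x => x.1.2)
       let F1 := g1.foldl (fun (p : Int × Int × Int) dgt =>
         if p.2.2 < n1 - 2 then (10*p.1 + dgt, p.2.1, p.2.2 + 1)
         else (p.1, 10*p.2.1 + dgt, p.2.2 + 1)) (s, d, i)
       let F2 := g2.foldl (fun (q : Int × Int) dgt =>
         (q.1 + (if q.2 = 0 then 10*dgt else dgt), q.2 + 1)) (t, j)
       (F1.1, F1.2.1, F2.1, F1.2.2, F2.2)) := by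
  induction l generalizing s d t i j with
  | nil => simp
  | cons h tl ih =>
    by_cases hc : h.2.2 - y_low < 20
    · by_cases hi : i < n1 - 2 <;> simp [hc, hi, ih]
    · simp [hc, not_lt.mp, ih]

-- combining lemma: A's four length-guarded branches equal B's validity test plus the
-- decomposed folds, for arbitrary digit lists g1, g2.
set_option maxHeartbeats 1000000 in
theorem pv_branches (n1 : Int) (g1 g2 : List Int) (hn : n1 = (g1.length : Int)) :
    (if g1.length = 4 ∧ g2.length = 3 then
        (10*g1[0]! + g1[1]!, 10*g1[2]! + g1[3]!, 10*g2[0]! + g2[1]! + g2[2]!)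
      else if g1.length = 4 ∧ g2.length = 2 then
        (10*g1[0]! + g1[1]!, 10*g1[2]! + g1[3]!, 10*g2[0]! + g2[1]!)
      else if g1.length = 5 ∧ g2.length = 2 then
        (100*g1[0]! + 10*g1[1]! + g1[2]!, 10*g1[3]! + g1[4]!, 10*g2[0]! + g2[1]!)
      else if g1.length = 5 ∧ g2.length = 3 then
        (100*g1[0]! + 10*g1[1]! + g1[2]!, 10*g1[3]! + g1[4]!, 10*g2[0]! + g2[1]! + g2[2]!)
      else ((-1 : Int), (-1 : Int), (-1 : Int))) =
    (if ¬((n1 = 4 ∨ n1 = 5) ∧ ((g2.length : Int) = 2 ∨ (g2.length : Int) = 3)) then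
        ((-1 : Int), (-1 : Int), (-1 : Int))
      else
        let F1 := g1.foldl (fun (p : Int × Int × Int) dgt =>
          if p.2.2 < n1 - 2 then (10*p.1 + dgt, p.2.1, p.2.2 + 1)
          else (p.1, 10*p.2.1 + dgt, p.2.2 + 1)) (0, 0, 0)
        let F2 := g2.foldl (fun (q : Int × Int) dgt =>
          (q.1 + (if q.2 = 0 then 10*dgt else dgt), q.2 + 1)) (0, 0)
        (F1.1, F1.2.1, F2.1)) := by
  subst hn
  by_cases h1 : (g1.length : Int) = 4 ∨ (g1.length : Int) = 5
  · by_cases h2 : (g2.length : Int) = 2 ∨ (g2.length : Int) = 3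
    · rw [if_neg (not_not_intro ⟨h1, h2⟩)]
      have h1' : g1.length = 4 ∨ g1.length = 5 := by omega
      have h2' : g2.length = 2 ∨ g2.length = 3 := by omega
      rcases g1 with _ | ⟨a1, _ | ⟨a2, _ | ⟨a3, _ | ⟨a4, _ | ⟨a5, _ | ⟨a6, r1⟩⟩⟩⟩⟩⟩ <;>
          simp only [List.length_nil, List.length_cons] at h1' <;> try omega
      all_goals (rcases g2 with _ | ⟨b1, _ | ⟨b2, _ | ⟨b3, _ | ⟨b4, r2⟩⟩⟩⟩ <;>
          simp only [List.length_nil, List.length_cons] at h2' <;> try omega)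
      all_goals norm_num [List.foldl]
      all_goals ring
    · have t2 : g2.length ≠ 2 := by omega
      have t3 : g2.length ≠ 3 := by omega
      conv_rhs => rw [if_pos (show ¬_ from fun hv => h2 hv.2)]
      simp [t2, t3]
  · have t4 : g1.length ≠ 4 := by omega
    have t5 : g1.length ≠ 5 := by omega
    conv_rhs => rw [if_pos (show ¬_ from fun hv => h1 hv.1)]
    simp [t4, t5]

-- ===== VERDICT (by name: the statement is the Claim_ definition above) =====
theorem get_nibp_spec : Claim_equal_get_nibp := by
  intro nibp _ hpre
  unfold Spec_get_nibp get_nibp get_nibp_alt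
  rcases nibp with _ | ⟨⟨⟨n0, t0⟩, ⟨x0, y0⟩⟩, rest⟩
  · exact absurd rfl hpre
  · by_cases h8 : ((((n0, t0), (x0, y0)) :: rest).length > 8)
    · rw [if_pos h8, if_pos h8]
    · rw [if_neg h8, if_neg h8]
      dsimp only
      rw [pv_partition, pv_count, pv_foldB]
      dsimp only
      simp only [List.nil_append]
      rw [pv_branches _ _ _ rfl]
      have hl := pv_len y0 ((((n0, t0), (x0, y0)) :: rest))
      have hge : (((List.filter (fun x => decide (x.2.2 - y0 ≥ 20)) (((n0, t0), (x0, y0)) :: rest)).length : Int))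
          = (((((n0, t0), (x0, y0)) :: rest).length : Int))
            - (((List.filter (fun x => decide (x.2.2 - y0 < 20)) (((n0, t0), (x0, y0)) :: rest)).length : Int)) := by
        omega
      simp only [List.length_map]
      rw [hge]
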